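-- pv_equiv track=rewrite | github.com/jschwartz27/Genetische-Programmierung | functions.py | find_subtree
-- ===== SOURCE A (Python) =====
-- operators = "+-*/"
--
-- def is_operator(val):
--     return val in operators
--
-- def find_subtree(exp, index):
--     stack = [exp[index]]
--     n = 2
--     for val in exp[index+1:]:
--         if n == 0:
--             break
--         stack.append(val)
--         if is_operator(val):
--             n += 1
--         else:
--             n -= 1
--
--     return "".join(stack)
-- ===== SOURCE B (Python) =====
-- operators = "+-*/"
--
-- def _parse(tokens):
--     # read one complete prefix subtree from the front of tokens;
--     # return (its tokens, the remaining tokens)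
--     if not tokens:
--         return [], tokens
--     val, rest = tokens[0], tokens[1:]
--     if val in operators:
--         left, rest = _parse(rest)
--         right, rest = _parse(rest)
--         return [val] + left + right, rest
--     return [val], rest
--
-- def find_subtree(exp, index):
--     root = exp[index]
--     rest = exp[index:][1:]
--     left, rest = _parse(rest)
--     right, _ = _parse(rest)
--     return "".join([root] + left + right)
-- ===== Notes on version B (the rewrite author's own statement) =====
-- stated objective: alternative
-- what changed: Replaced A's single scan with an operator/operand counter by a recursive-descent parser that reads the root and then two complete prefix subtrees from the remaining tokens.
-- intended difference: For index = -1 on a non-empty list, A's slice exp[index+1:] becomes exp[0:] and rescans the whole expression from the start (e.g. ['x'],-1 gives 'xx'), while B returns just the last element 'x', the subtree actually rooted at the final position, which is the intended value. — e.g. on find_subtree(["+", "1", "2"], -1): A returns "2+12", B returns "2"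
import Mathlib
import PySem

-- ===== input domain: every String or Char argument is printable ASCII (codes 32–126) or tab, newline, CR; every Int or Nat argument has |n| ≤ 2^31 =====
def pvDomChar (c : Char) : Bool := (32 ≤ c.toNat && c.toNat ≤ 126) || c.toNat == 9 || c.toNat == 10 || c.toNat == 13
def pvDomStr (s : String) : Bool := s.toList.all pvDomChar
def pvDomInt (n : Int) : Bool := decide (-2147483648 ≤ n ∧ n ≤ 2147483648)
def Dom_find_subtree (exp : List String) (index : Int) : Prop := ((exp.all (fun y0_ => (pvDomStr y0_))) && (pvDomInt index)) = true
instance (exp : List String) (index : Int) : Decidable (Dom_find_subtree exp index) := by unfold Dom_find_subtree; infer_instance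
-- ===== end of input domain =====

-- B replaces A's counter scan by a recursive-descent parser reading the root and then
-- two complete prefix subtrees (objective: alternative decomposition, same cost).

-- ===== PORT A =====
def pv_operators : String := "+-*/"

def is_operator (val : String) : Bool := PySem.Str.isIn val pv_operators

def find_subtree_loop : List String → List String → Int → List String
  | [], stack, _ => stack
  | v :: rest, stack, n =>
      if n = 0 then stack
      else find_subtree_loop rest (stack ++ [v]) (if is_operator v then n + 1 else n - 1)

def find_subtree (exp : List String) (index : Int) : String :=
  match PySem.List.pyGet? exp index with
  | none => ""   -- IndexError: excluded by Pre_find_subtree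
  | some root =>
      PySem.Str.join "" (find_subtree_loop (PySem.List.slice exp (some (index + 1)) none) [root] 2)

-- ===== PORT B =====
-- _parse ts = (tokens of the first complete prefix subtree, remaining tokens).
-- The fuel argument only makes the recursion structural; fuel = ts.length always suffices
-- (each call consumes one token before recursing), so the 0-fuel branch is unreachable.
def pv_parse : Nat → List String → List String × List String
  | 0, ts => ([], ts)
  | _ + 1, [] => ([], [])
  | fuel + 1, v :: rest =>
      if PySem.Str.isIn v pv_operators then
        let l := pv_parse fuel rest
        let r := pv_parse fuel l.2
        (v :: (l.1 ++ r.1), r.2)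
      else ([v], rest)

def pv_parseTop (ts : List String) : List String × List String := pv_parse ts.length ts

def find_subtree_alt (exp : List String) (index : Int) : String :=
  match PySem.List.pyGet? exp index with
  | none => ""   -- IndexError: excluded by Pre_find_subtree
  | some root =>
      let rest := PySem.List.slice (PySem.List.slice exp (some index) none) (some 1) none
      let l := pv_parseTop rest
      let r := pv_parseTop l.2
      PySem.Str.join "" (root :: (l.1 ++ r.1))

-- ===== PRECONDITION & SPEC =====
-- Pre_ excludes exactly the out-of-range indices, on which Python A raises IndexError.
def Pre_find_subtree (exp : List String) (index : Int) : Prop :=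
  PySem.Raise.InRange exp.length index
instance (exp : List String) (index : Int) : Decidable (Pre_find_subtree exp index) := by
  unfold Pre_find_subtree; infer_instance

def pvWitness_find_subtree : List String × Int := (["+", "1", "2"], 0)

-- For index = -1 on a non-empty list, A's slice exp[index+1:] becomes exp[0:] and rescans the
-- whole expression from the start, so A returns the last element followed by a walk of the whole
-- list; B returns just the prefix subtree rooted at the last position, the intended value.
def D_find_subtree (exp : List String) (index : Int) : Prop :=
  index = -1 ∧ exp ≠ []
instance (exp : List String) (index : Int) : Decidable (D_find_subtree exp index) := by
  unfold D_find_subtree; infer_instance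

def Spec_find_subtree (exp : List String) (index : Int) (out : String) : Prop :=
  ¬ D_find_subtree exp index → out = find_subtree_alt exp index
instance (exp : List String) (index : Int) (out : String) : Decidable (Spec_find_subtree exp index out) := by
  unfold Spec_find_subtree; infer_instance

def pvDiffWitness_find_subtree : List String × Int := (["+", "1", "2"], -1)
def pvDiffWitnessOut_find_subtree : String × String := ("2+12", "2")

-- ===== CLAIM (what is proved, stated in full; the proofs are below) =====
def Claim_unchanged_find_subtree : Prop := ∀ (exp : List String) (index : Int), Dom_find_subtree exp index → Pre_find_subtree exp index → Spec_find_subtree exp index (find_subtree exp index)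
def Claim_changed_find_subtree : Prop := Dom_find_subtree (pvDiffWitness_find_subtree.1) (pvDiffWitness_find_subtree.2) ∧ Pre_find_subtree (pvDiffWitness_find_subtree.1) (pvDiffWitness_find_subtree.2) ∧ D_find_subtree (pvDiffWitness_find_subtree.1) (pvDiffWitness_find_subtree.2) ∧ find_subtree (pvDiffWitness_find_subtree.1) (pvDiffWitness_find_subtree.2) = pvDiffWitnessOut_find_subtree.1 ∧ find_subtree_alt (pvDiffWitness_find_subtree.1) (pvDiffWitness_find_subtree.2) = pvDiffWitnessOut_find_subtree.2 ∧ pvDiffWitnessOut_find_subtree.1 ≠ pvDiffWitnessOut_find_subtree.2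

-- ===== LEMMAS AND PROOFS =====

-- the parser's remainder never grows
theorem pv_parse_rest_le (fuel : Nat) : ∀ ts : List String, (pv_parse fuel ts).2.length ≤ ts.length := by
  induction fuel with
  | zero => intro ts; simp [pv_parse]
  | succ fuel ih =>
      intro ts
      cases ts with
      | nil => simp [pv_parse]
      | cons v rest =>
          by_cases h : PySem.Str.isIn v pv_operators = true
          · have h1 := ih rest
            have h2 := ih (pv_parse fuel rest).2
            simp only [pv_parse]
            rw [if_pos h]
            simp only [List.length_cons]
            omega
          · simp only [pv_parse]
            rw [if_neg h]
            simp

theorem loop_zero (ts : List String) (stack : List String) :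
    find_subtree_loop ts stack 0 = stack := by
  cases ts <;> simp [find_subtree_loop]

-- A's counter loop at count n ≥ 1 first traverses exactly one complete prefix subtree
theorem loop_step (fuel : Nat) :
    ∀ (ts stack : List String) (n : Int), ts.length ≤ fuel → 1 ≤ n →
      find_subtree_loop ts stack n
        = find_subtree_loop (pv_parse fuel ts).2 (stack ++ (pv_parse fuel ts).1) (n - 1) := by
  induction fuel with
  | zero =>
      intro ts stack n hlen _
      have : ts = [] := List.length_eq_zero_iff.mp (Nat.le_zero.mp hlen)
      subst this; simp [pv_parse, find_subtree_loop]
  | succ fuel ih =>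
      intro ts stack n hlen hn
      cases ts with
      | nil => simp [pv_parse, find_subtree_loop]
      | cons v rest =>
          have hn0 : ¬ n = 0 := by omega
          have hr : rest.length ≤ fuel := by
            simpa using hlen
          by_cases h : PySem.Str.isIn v pv_operators = true
          · simp only [find_subtree_loop, hn0, if_false, is_operator, h, if_true, pv_parse]
            rw [ih rest (stack ++ [v]) (n + 1) hr (by omega)]
            have hr2 : (pv_parse fuel rest).2.length ≤ fuel :=
              le_trans (pv_parse_rest_le fuel rest) hr
            have e1 : n + 1 - 1 = n := by ring
            rw [e1, ih (pv_parse fuel rest).2 _ n hr2 hn]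
            simp [List.append_assoc]
          · simp only [find_subtree_loop, hn0, if_false, is_operator, pv_parse]
            rw [if_neg h, if_neg h]

-- the two slices agree for an in-range index other than -1
theorem clamp_succ (n : Nat) (i : Int) (h1 : -(n : Int) ≤ i) (h2 : i < n) (h3 : i ≠ -1) :
    PySem.List.clampIdx n (i + 1) = PySem.List.clampIdx n i + 1 := by
  simp only [PySem.List.clampIdx]
  split_ifs <;> omega

theorem slice_shift (exp : List String) (index : Int)
    (h1 : -(exp.length : Int) ≤ index) (h2 : index < exp.length) (hne : index ≠ -1) :
    PySem.List.slice exp (some (index + 1)) none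
      = PySem.List.slice (PySem.List.slice exp (some index) none) (some 1) none := by
  rw [PySem.List.slice_from_one, PySem.List.slice_some_none, PySem.List.slice_some_none,
    clamp_succ exp.length index h1 h2 hne]
  rw [← List.drop_drop]
  simp

-- ===== VERDICT (by name: the statement is the Claim_ definition above) =====
theorem find_subtree_spec : Claim_unchanged_find_subtree := by
  intro exp index _ hpre hnd
  have hrange : -(exp.length : Int) ≤ index ∧ index < exp.length := by
    simpa [Pre_find_subtree, PySem.Raise.InRange] using hpre
  have hne : index ≠ -1 := by
    intro hidx
    apply hnd
    refine ⟨hidx, ?_⟩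
    intro hnil
    subst hnil
    simp at hrange
    omega
  cases hget : PySem.List.pyGet? exp index with
  | none =>
      exfalso
      have hnr := (PySem.List.pyGet?_eq_none_iff exp index).mp hget
      exact hnr (by simp [PySem.Raise.InRange]; omega)
  | some root =>
      simp only [find_subtree, find_subtree_alt, hget]
      rw [slice_shift exp index hrange.1 hrange.2 hne]
      set ts := PySem.List.slice (PySem.List.slice exp (some index) none) (some 1) none with hts
      rw [loop_step ts.length ts [root] 2 (le_refl _) (by omega)]
      have h21 : (2 : Int) - 1 = 1 := by norm_num
      rw [h21]
      rw [show find_subtree_loop (pv_parse ts.length ts).2 ([root] ++ (pv_parse ts.length ts).1) 1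
            = find_subtree_loop (pv_parseTop ts).2 ([root] ++ (pv_parseTop ts).1) 1 from rfl]
      rw [loop_step (pv_parseTop ts).2.length (pv_parseTop ts).2 _ 1
        (le_refl _) (le_refl _)]
      have h10 : (1 : Int) - 1 = 0 := by norm_num
      rw [h10, loop_zero]
      simp [pv_parseTop]

theorem find_subtree_changed : Claim_changed_find_subtree := by
  unfold Claim_changed_find_subtree
  refine ⟨by decide, by decide, by decide, ?_, ?_, by decide⟩
  · decide
  · decide
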